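-- pv_equiv track=rewrite | github.com/zhuo2015/wlkfuture | indicator_stats.py | _replace_signal
-- ===== SOURCE A (Python) =====
-- def _replace_signal(lst):
--     res = []
--     for i in range(0, len(lst), 2):
--         if lst[i] == 1:
--             res.append('long open')
--             res.append('long close')
--         else:
--             res.append('short open')
--             res.append('short close')
--     return res[:len(lst)]
-- ===== SOURCE B (Python) =====
-- def _replace_signal(lst):
--     return [('long' if lst[i - i % 2] == 1 else 'short')
--             + (' open' if i % 2 == 0 else ' close')
--             for i in range(len(lst))]
-- ===== Notes on version B (the rewrite author's own statement) =====
-- stated objective: simpler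
-- what changed: Replaces A's step-2 loop that appends an open/close pair per even index and then truncates with a single comprehension over all output indices, deriving each string directly from its own index via lst[i - i%2] with no truncation.
import Mathlib
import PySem

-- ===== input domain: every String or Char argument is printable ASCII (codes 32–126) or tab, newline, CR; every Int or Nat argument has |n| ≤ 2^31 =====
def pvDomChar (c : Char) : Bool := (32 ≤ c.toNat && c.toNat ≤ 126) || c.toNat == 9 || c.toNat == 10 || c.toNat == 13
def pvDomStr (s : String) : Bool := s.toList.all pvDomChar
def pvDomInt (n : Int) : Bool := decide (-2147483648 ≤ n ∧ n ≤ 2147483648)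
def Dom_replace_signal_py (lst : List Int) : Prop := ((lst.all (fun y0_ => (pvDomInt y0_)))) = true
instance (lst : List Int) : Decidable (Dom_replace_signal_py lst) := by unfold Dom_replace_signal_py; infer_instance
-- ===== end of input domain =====

-- B replaces A's step-2 pair-append-then-truncate loop by a single comprehension over
-- every output index i, deriving each string from i alone (objective: simpler).

-- ===== PORT A =====
-- the 'for i in range(0, len(lst), 2)' loop as recursion on the index i;
-- lst[i] is always in range here, so pyGetD's default is never used
def replace_signal_loopA (lst : List Int) (i : Nat) (res : List String) : List String :=
  if i < lst.length then
    (if PySem.List.pyGetD lst (i : Int) 0 == 1 then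
      replace_signal_loopA lst (i + 2) (res ++ ["long open"] ++ ["long close"])
    else
      replace_signal_loopA lst (i + 2) (res ++ ["short open"] ++ ["short close"]))
  else res
termination_by lst.length - i

def replace_signal_py (lst : List Int) : List String :=
  PySem.List.slice (replace_signal_loopA lst 0 []) none (some (lst.length : Int))

-- ===== PORT B =====
-- the list comprehension; lst[i - i%2] is always in range, so pyGetD's default is never used
def replace_signal_py_alt (lst : List Int) : List String :=
  (PySem.List.pyRange 0 (lst.length : Int) 1).map (fun i =>
    (if PySem.List.pyGetD lst (i - PySem.Int.mod i 2) 0 == 1 then "long" else "short") ++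
    (if PySem.Int.mod i 2 == 0 then " open" else " close"))

-- ===== PRECONDITION & SPEC =====
def Spec_replace_signal_py (lst : List Int) (out : List String) : Prop := out = replace_signal_py_alt lst
instance (lst : List Int) (out : List String) : Decidable (Spec_replace_signal_py lst out) := by unfold Spec_replace_signal_py; infer_instance

-- ===== CLAIM (what is proved, stated in full; the proofs are below) =====
def Claim_equal_replace_signal_py : Prop := ∀ (lst : List Int), Dom_replace_signal_py lst → Spec_replace_signal_py lst (replace_signal_py lst)

-- ===== LEMMAS AND PROOFS =====

-- canonical value both ports are shown to equal
def pvBuild : List Int → List String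
  | [] => []
  | [a] => [(if a == 1 then "long" else "short") ++ " open"]
  | a :: _ :: t =>
      ((if a == 1 then "long" else "short") ++ " open") ::
      ((if a == 1 then "long" else "short") ++ " close") :: pvBuild t

-- the pair list A's loop builds before truncation
def pvPairs : List Int → List String
  | [] => []
  | [a] => [(if a == 1 then "long" else "short") ++ " open",
            (if a == 1 then "long" else "short") ++ " close"]
  | a :: _ :: t =>
      ((if a == 1 then "long" else "short") ++ " open") ::
      ((if a == 1 then "long" else "short") ++ " close") :: pvPairs t

lemma pvPairs_cons (a : Int) (rest : List Int) :
    pvPairs (a :: rest) =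
      ((if a == 1 then "long" else "short") ++ " open") ::
      ((if a == 1 then "long" else "short") ++ " close") :: pvPairs (rest.drop 1) := by
  cases rest <;> simp [pvPairs]

lemma loopA_eq (lst : List Int) (i : Nat) (res : List String) :
    replace_signal_loopA lst i res = res ++ pvPairs (lst.drop i) := by
  fun_induction replace_signal_loopA lst i res with
  | case1 i res h h1 ih =>
      rw [ih]
      have hd : lst.drop i = lst[i] :: lst.drop (i + 1) := List.drop_eq_getElem_cons h
      have hd2 : lst.drop (i + 2) = (lst.drop (i + 1)).drop 1 := by
        rw [List.drop_drop]
      rw [PySem.List.pyGetD_natCast, List.getD_eq_getElem _ _ h] at h1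
      rw [hd, pvPairs_cons, hd2]
      simp [h1]
  | case2 i res h h1 ih =>
      rw [ih]
      have hd : lst.drop i = lst[i] :: lst.drop (i + 1) := List.drop_eq_getElem_cons h
      have hd2 : lst.drop (i + 2) = (lst.drop (i + 1)).drop 1 := by
        rw [List.drop_drop]
      rw [PySem.List.pyGetD_natCast, List.getD_eq_getElem _ _ h] at h1
      rw [hd, pvPairs_cons, hd2]
      simp [h1]
  | case3 i res h =>
      have : lst.drop i = [] := List.drop_eq_nil_of_le (by omega)
      simp [this, pvPairs]

lemma take_pvPairs (lst : List Int) : (pvPairs lst).take lst.length = pvBuild lst := by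
  fun_induction pvBuild lst with
  | case1 => simp [pvPairs]
  | case2 a => simp [pvPairs]
  | case3 a b t ih =>
      simp [pvPairs, List.take_succ_cons, ih]

lemma portA_eq (lst : List Int) : replace_signal_py lst = pvBuild lst := by
  rw [replace_signal_py, loopA_eq, List.drop_zero, List.nil_append,
    PySem.List.slice_to_natCast, take_pvPairs]

-- B's comprehension, restated over Nat indices
lemma altB_nat (lst : List Int) :
    replace_signal_py_alt lst = (List.range lst.length).map (fun k =>
      (if lst.getD (k - k % 2) 0 == 1 then "long" else "short") ++
      (if k % 2 == 0 then " open" else " close")) := by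
  rw [replace_signal_py_alt, PySem.List.pyRange_one]
  simp only [Int.sub_zero, Int.toNat_natCast, List.map_map]
  apply List.map_congr_left
  intro k _
  simp only [Function.comp, Int.zero_add]
  have hm : PySem.Int.mod (k : Int) 2 = ((k % 2 : Nat) : Int) := by
    rw [PySem.Int.mod_eq_emod_of_pos (by norm_num)]
    push_cast
    rfl
  rw [hm]
  have hidx : (k : Int) - ((k % 2 : Nat) : Int) = ((k - k % 2 : Nat) : Int) := by
    have : k % 2 <= k := Nat.mod_le k 2
    push_cast; omega
  rw [hidx, PySem.List.pyGetD_natCast]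
  have h2 : ((2 : Int) ∣ (k : Int)) ↔ k % 2 = 0 := by omega
  simp [h2]

lemma portB_eq (lst : List Int) : replace_signal_py_alt lst = pvBuild lst := by
  rw [altB_nat]
  fun_induction pvBuild lst with
  | case1 => simp
  | case2 a => simp [List.range_succ, List.getD]
  | case3 a b t ih =>
      have hsplit : List.range ((a :: b :: t).length) =
          List.range 2 ++ (List.range t.length).map (2 + ·) := by
        have : (a :: b :: t).length = 2 + t.length := by simp; omega
        rw [this, List.range_add]
      rw [hsplit, List.map_append, List.map_map]
      have head2 : (List.range 2).map (fun k =>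
          (if (a :: b :: t).getD (k - k % 2) 0 == 1 then "long" else "short") ++
          (if k % 2 == 0 then " open" else " close")) =
          [((if a == 1 then "long" else "short") ++ " open"),
           ((if a == 1 then "long" else "short") ++ " close")] := by
        simp [List.range_succ, List.getD]
      rw [head2, ← ih]
      simp only [List.cons_append, List.nil_append, List.cons.injEq, true_and]
      apply List.map_congr_left
      intro k _
      simp only [Function.comp]
      have hmod : (2 + k) % 2 = k % 2 := by omega
      rw [hmod]
      have hsub : 2 + k - k % 2 = (k - k % 2) + 2 := by omega
      rw [hsub]
      simp [List.getD]

-- ===== VERDICT (by name: the statement is the Claim_ definition above) =====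
theorem replace_signal_py_spec : Claim_equal_replace_signal_py := by
  intro lst _
  unfold Spec_replace_signal_py
  rw [portA_eq, portB_eq]
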